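-- pv_equiv track=rewrite | github.com/vipinkjonwal/python-learners | interviewQuestions.py | reversePartialList
-- ===== SOURCE A (Python) =====
-- def reversePartialList(arr, start, end) -> list[int]:
--     i = start if start > 0 else 0
--     j = end if end <= len(arr)-1 else len(arr)-1
--     while(i<j):
--         arr[i], arr[j] = arr[j], arr[i]
--         i+=1
--         j-=1
--     return arr
-- ===== SOURCE B (Python) =====
-- def reversePartialList(arr, start, end) -> list[int]:
--     i = start if start > 0 else 0
--     j = end if end <= len(arr)-1 else len(arr)-1
--     if i < j:
--         arr[i:j+1] = arr[i:j+1][::-1]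
--     return arr
-- ===== Notes on version B (the rewrite author's own statement) =====
-- stated objective: idiomatic
-- what changed: A's explicit while-loop of pairwise swaps with two moving indices is replaced by a single guarded slice reversal (arr[i:j+1] = arr[i:j+1][::-1]) after the same bound clamping.
import Mathlib
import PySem

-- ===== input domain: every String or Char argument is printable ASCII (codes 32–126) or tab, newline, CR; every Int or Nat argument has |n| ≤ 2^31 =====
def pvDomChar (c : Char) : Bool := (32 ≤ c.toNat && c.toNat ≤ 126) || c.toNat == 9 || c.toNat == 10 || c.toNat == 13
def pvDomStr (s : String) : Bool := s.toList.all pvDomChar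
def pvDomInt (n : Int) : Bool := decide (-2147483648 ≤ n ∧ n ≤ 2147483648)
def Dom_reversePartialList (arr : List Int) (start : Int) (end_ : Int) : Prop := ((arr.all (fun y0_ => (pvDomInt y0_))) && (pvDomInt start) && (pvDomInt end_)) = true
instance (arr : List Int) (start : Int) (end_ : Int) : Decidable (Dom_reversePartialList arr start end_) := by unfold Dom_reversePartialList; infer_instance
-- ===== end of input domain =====

-- B replaces A's pairwise swap loop by a single slice reversal (arr[i:j+1] = arr[i:j+1][::-1]); objective: idiomatic.
-- Both programs mutate the list in place in Python; the equivalence proved here is about the returned value.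

-- ===== PORT A =====
-- the while(i<j) swap loop; pyGetD/pySetD with default are exact here because whenever the
-- loop body runs in A, 0 ≤ i < j ≤ len(arr)-1, so both indices are in range
def revLoopA (arr : List Int) (i j : Int) : List Int :=
  if _h : i < j then
    let ai := PySem.List.pyGetD arr i 0
    let aj := PySem.List.pyGetD arr j 0
    revLoopA (PySem.List.pySetD (PySem.List.pySetD arr i aj) j ai) (i + 1) (j - 1)
  else arr
termination_by (j - i).toNat
decreasing_by omega

def reversePartialList (arr : List Int) (start : Int) (end_ : Int) : List Int :=
  let i := if start > 0 then start else 0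
  let j := if end_ ≤ (arr.length : Int) - 1 then end_ else (arr.length : Int) - 1
  revLoopA arr i j

-- ===== PORT B =====
-- slice assignment arr[i:j+1] = X is ported by hand as take i ++ X ++ drop (j+1); this is exact
-- because in the executed branch 0 ≤ i < j ≤ len(arr)-1, so both bounds are nonnegative and ≤ len
def reversePartialList_alt (arr : List Int) (start : Int) (end_ : Int) : List Int :=
  let i := if start > 0 then start else 0
  let j := if end_ ≤ (arr.length : Int) - 1 then end_ else (arr.length : Int) - 1
  if i < j then
    arr.take i.toNat ++ (PySem.List.slice arr (some i) (some (j + 1))).reverse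
      ++ arr.drop (j + 1).toNat
  else arr

-- ===== PRECONDITION & SPEC =====
def Spec_reversePartialList (arr : List Int) (start : Int) (end_ : Int) (out : List Int) : Prop := out = reversePartialList_alt arr start end_
instance (arr : List Int) (start : Int) (end_ : Int) (out : List Int) : Decidable (Spec_reversePartialList arr start end_ out) := by unfold Spec_reversePartialList; infer_instance

-- ===== CLAIM (what is proved, stated in full; the proofs are below) =====
def Claim_equal_reversePartialList : Prop := ∀ (arr : List Int) (start : Int) (end_ : Int), Dom_reversePartialList arr start end_ → Spec_reversePartialList arr start end_ (reversePartialList arr start end_)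

-- ===== LEMMAS AND PROOFS =====

lemma revLoopA_getElem? (n : Nat) : ∀ (arr : List Int) (a b : Nat), b < arr.length → b - a = n →
    ∀ k : Nat, (revLoopA arr (a : Int) (b : Int))[k]? =
      if a ≤ k ∧ k ≤ b then arr[a + b - k]? else arr[k]? := by
  induction n using Nat.strong_induction_on with
  | _ n ih =>
    intro arr a b hb hn k
    rw [revLoopA]
    split
    · rename_i h
      have hab : a < b := by exact_mod_cast h
      have e1 : (a : Int) + 1 = ((a + 1 : Nat) : Int) := by push_cast; ring
      have e2 : (b : Int) - 1 = ((b - 1 : Nat) : Int) := by omega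
      rw [e1, e2]
      simp only [PySem.List.pySetD_natCast, PySem.List.pyGetD_natCast]
      rw [ih (b - 1 - (a + 1)) (by omega) _ (a+1) (b-1) (by simp; omega) rfl k]
      have ha' : a < arr.length := by omega
      simp only [List.getElem?_set, List.length_set, List.getD_eq_getElem?_getD,
        List.getElem?_eq_getElem hb, List.getElem?_eq_getElem ha', Option.getD_some]
      split_ifs <;>
        first
          | omega
          | rfl
          | (rw [show a + b - k = a from by omega, List.getElem?_eq_getElem ha'])
          | (rw [show k = a from by omega, List.getElem?_eq_getElem ha'])
          | (rw [show a + b - k = b from by omega, List.getElem?_eq_getElem hb])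
          | (rw [show k = b from by omega, List.getElem?_eq_getElem hb])
          | (rw [show a + 1 + (b - 1) - k = a + b - k from by omega])
    · rename_i h
      have hba : (b:Int) ≤ (a:Int) := not_lt.mp h
      split_ifs with hc
      · have : a + b - k = k := by omega
        rw [this]
      · rfl

lemma revLoopA_closed (arr : List Int) (i j : Int) (hi : 0 ≤ i) (hj : j ≤ (arr.length : Int) - 1) :
    revLoopA arr i j =
      if i < j then
        arr.take i.toNat ++ (PySem.List.slice arr (some i) (some (j + 1))).reverse
          ++ arr.drop (j + 1).toNat
      else arr := by
  split_ifs with hij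
  · have hj0 : 0 ≤ j := le_trans hi (le_of_lt hij)
    obtain ⟨a, rfl⟩ : ∃ a : Nat, i = (a : Int) := ⟨i.toNat, (Int.toNat_of_nonneg hi).symm⟩
    obtain ⟨b, rfl⟩ : ∃ b : Nat, j = (b : Int) := ⟨j.toNat, (Int.toNat_of_nonneg hj0).symm⟩
    have hab : a < b := by exact_mod_cast hij
    have hb : b < arr.length := by omega
    rw [PySem.List.slice_toNat arr (a := (a:Int)) (b := (b:Int)+1) (by omega) (by omega)]
    have e1 : ((b:Int) + 1).toNat = b + 1 := by omega
    have e2 : (a:Int).toNat = a := by omega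
    rw [e1, e2]
    apply List.ext_getElem?
    intro k
    rw [revLoopA_getElem? (b - a) arr a b hb rfl k]
    have hseg : ((arr.drop a).take (b + 1 - a)).length = b + 1 - a := by
      simp; omega
    have hL1 : (arr.take a).length = a := by simp; omega
    by_cases h1 : k < a
    · rw [List.getElem?_append_left (by simp [hseg]; omega),
          List.getElem?_append_left (by simp; omega),
          List.getElem?_take_of_lt h1, if_neg (by omega)]
    · by_cases h2 : k ≤ b
      · rw [List.getElem?_append_left (by simp [hseg]; omega),
            List.getElem?_append_right (by simp; omega), hL1,
            List.getElem?_reverse (by rw [hseg]; omega),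
            hseg,
            List.getElem?_take_of_lt (by omega),
            List.getElem?_drop,
            if_pos ⟨by omega, h2⟩]
        congr 1
        omega
      · rw [List.getElem?_append_right (by simp [hseg]; omega),
            List.getElem?_drop, if_neg (by omega)]
        congr 1
        simp [hseg]
        omega
  · rw [revLoopA]; simp [not_lt.mp hij]

-- ===== VERDICT (by name: the statement is the Claim_ definition above) =====
theorem reversePartialList_spec : Claim_equal_reversePartialList := by
  intro arr start end_ _
  unfold Spec_reversePartialList reversePartialList reversePartialList_alt
  exact revLoopA_closed arr _ _ (by split_ifs <;> omega) (by split_ifs with h <;> omega)
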